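-- pv_equiv track=rewrite | github.com/ryldshadowcry/bookbot | stats.py | get_lower_character_count
-- ===== SOURCE A (Python) =====
-- def get_lower_character_count(book):
-- 	words = book.split()
-- 	all_lower = book.lower()
-- 	lowercasedictionary = {}
-- 	for letter in all_lower:
-- 		if letter in lowercasedictionary:
-- 			lowercasedictionary[letter] = lowercasedictionary[letter] +1
-- 		else:
-- 			lowercasedictionary[letter] = 1
-- 	return (lowercasedictionary)
-- ===== SOURCE B (Python) =====
-- def get_lower_character_count(book):
-- 	words = book.split()
-- 	all_lower = book.lower()
-- 	return {c: all_lower.count(c) for c in dict.fromkeys(all_lower)}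
-- ===== Notes on version B (the rewrite author's own statement) =====
-- stated objective: faster
-- what changed: Replaces the accumulating per-character dict loop with a comprehension over the first-occurrence distinct characters (dict.fromkeys) counting each via the C-level str.count scan.
import Mathlib
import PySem

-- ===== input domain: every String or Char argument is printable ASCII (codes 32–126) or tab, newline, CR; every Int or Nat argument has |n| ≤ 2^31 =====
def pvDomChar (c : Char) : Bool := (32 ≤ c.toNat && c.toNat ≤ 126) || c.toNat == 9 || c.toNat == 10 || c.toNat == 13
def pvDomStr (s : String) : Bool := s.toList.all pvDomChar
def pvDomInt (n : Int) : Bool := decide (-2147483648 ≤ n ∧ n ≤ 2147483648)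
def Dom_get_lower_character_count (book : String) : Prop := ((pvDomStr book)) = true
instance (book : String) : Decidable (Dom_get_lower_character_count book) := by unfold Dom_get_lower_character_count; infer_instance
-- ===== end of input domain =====

-- B replaces A's accumulating dict loop with a count per first-occurrence distinct character
-- (more idiomatic; same return value). Python dict ↦ List (String × Int) in insertion order.

-- ===== PORT A =====
def get_lower_character_count (book : String) : List (String × Int) :=
  let _words := PySem.Str.split₀ book   -- dead assignment in A, kept for faithfulness
  let all_lower := (PySem.Str.lower book).toList
  let d := all_lower.foldl
    (fun d c => if d.contains c then d.insert c (d.getD c 0 + 1) else d.insert c 1)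
    PySem.Dict.empty
  d.items.map (fun kv => (String.ofList [kv.1], kv.2))   -- Python's 1-char-string keys

-- ===== PORT B =====
def get_lower_character_count_alt (book : String) : List (String × Int) :=
  let _words := PySem.Str.split₀ book   -- same dead assignment as in Source B
  let all_lower := (PySem.Str.lower book).toList
  -- {c: all_lower.count(c) for c in dict.fromkeys(all_lower)}; str.count of a 1-char needle = char count
  (PySem.List.dedup all_lower).map (fun c => (String.ofList [c], (all_lower.count c : Int)))

-- ===== PRECONDITION & SPEC =====
def Spec_get_lower_character_count (book : String) (out : List (String × Int)) : Prop := out = get_lower_character_count_alt book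
instance (book : String) (out : List (String × Int)) : Decidable (Spec_get_lower_character_count book out) := by unfold Spec_get_lower_character_count; infer_instance

-- ===== CLAIM (what is proved, stated in full; the proofs are below) =====
def Claim_equal_get_lower_character_count : Prop := ∀ (book : String), Dom_get_lower_character_count book → Spec_get_lower_character_count book (get_lower_character_count book)

-- ===== LEMMAS AND PROOFS =====

-- A's loop body, with the redundant membership test removed, is the standard counting insert.
theorem pv_body_eq (d : PySem.Dict Char Int) (c : Char) :
    (if d.contains c then d.insert c (d.getD c 0 + 1) else d.insert c 1)
      = d.insert c (d.getD c 0 + 1) := by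
  by_cases h : d.contains c
  · simp [h]
  · simp [h, PySem.Dict.getD_of_not_contains (d := d) (k := c) (d0 := 0) (by simpa using h)]

-- ===== VERDICT (by name: the statement is the Claim_ definition above) =====
theorem get_lower_character_count_spec : Claim_equal_get_lower_character_count := by
  intro book _
  show get_lower_character_count book = get_lower_character_count_alt book
  unfold get_lower_character_count get_lower_character_count_alt
  simp only [funext fun d => funext fun c => pv_body_eq d c,
    PySem.Dict.foldl_insert_getD_add_one_eq_counter, PySem.Dict.items_counter,
    PySem.List.dedup_eq_ofList, List.map_map, Function.comp_def]
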